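-- pv_equiv track=rewrite | github.com/andreygubarev/markdown-hints | gen.py | render_specs
-- ===== SOURCE A (Python) =====
-- def render_specs(specs):
--     specs = list(specs)
--     kind = specs[0]['kind']
--     for s in specs:
--         if s['kind'] != kind:
--             yield '\n---\n'
--             kind = s['kind']
--         yield s['spec']
-- ===== SOURCE B (Python) =====
-- def render_specs(specs):
--     specs = list(specs)
--     n = len(specs)
--     i = 0
--     first = True
--     while i < n:
--         k = specs[i]['kind']
--         j = i
--         while j < n and specs[j]['kind'] == k:
--             j += 1
--         if not first:
--             yield '\n---\n'
--         first = False
--         for s in specs[i:j]: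
--             yield s['spec']
--         i = j
-- ===== Notes on version B (the rewrite author's own statement) =====
-- stated objective: alternative
-- what changed: B scans the list group-by-group with a two-pointer inner loop over runs of equal 'kind' and a first-group flag, instead of A's per-element comparison against a running kind variable; on empty input B naturally yields nothing where A raises IndexError.
import Mathlib
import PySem

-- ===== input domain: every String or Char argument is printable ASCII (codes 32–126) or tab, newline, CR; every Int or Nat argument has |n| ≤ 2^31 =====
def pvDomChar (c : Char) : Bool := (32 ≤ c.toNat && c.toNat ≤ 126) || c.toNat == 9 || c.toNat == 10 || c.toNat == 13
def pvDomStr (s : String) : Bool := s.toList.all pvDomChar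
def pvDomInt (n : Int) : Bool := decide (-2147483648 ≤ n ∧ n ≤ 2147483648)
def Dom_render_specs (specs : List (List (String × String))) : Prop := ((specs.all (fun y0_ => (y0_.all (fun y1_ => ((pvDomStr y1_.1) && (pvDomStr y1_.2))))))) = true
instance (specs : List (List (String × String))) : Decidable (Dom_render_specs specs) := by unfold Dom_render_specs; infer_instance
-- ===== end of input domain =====

-- B scans group-by-group (two-pointer runs of equal 'kind' + first-group flag) instead of A's
-- per-element comparison with a running kind variable; return-value equivalence on nonempty,
-- well-keyed input. (Both Pythons are generators; the claim is about the yielded sequence.)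

-- dict lookup d[k]: first match; Pre_ guarantees the key is present, so the "" default is never used
def pvDGet (d : List (String × String)) (k : String) : String :=
  ((d.find? (fun p => p.1 == k)).map (·.2)).getD ""

-- ===== PORT A =====
-- kind = specs[0]['kind']; for s in specs: if s['kind'] != kind: yield sep; kind = s['kind']; yield s['spec']
def render_specs (specs : List (List (String × String))) : List String :=
  let kind0 := ((PySem.List.pyGet? specs 0).map (fun d => pvDGet d "kind")).getD ""
  (specs.foldl
    (fun (st : List String × String) s =>
      let k := pvDGet s "kind"
      if k ≠ st.2 then (st.1 ++ ["\n---\n", pvDGet s "spec"], k)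
      else (st.1 ++ [pvDGet s "spec"], st.2))
    ([], kind0)).1

-- ===== PORT B =====
-- outer while: take the current run of equal 'kind' (inner while = span), emit separator unless first,
-- then the run's 'spec's; recurse on the rest
def pvAltLoop (xs : List (List (String × String))) (first : Bool) : List String :=
  match xs with
  | [] => []
  | x :: rest =>
    let p := rest.span (fun s => pvDGet s "kind" == pvDGet x "kind")
    (if first then [] else ["\n---\n"]) ++ (x :: p.1).map (fun s => pvDGet s "spec")
      ++ pvAltLoop p.2 false
termination_by xs.length
decreasing_by
  simp only [List.span_eq_takeWhile_dropWhile]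
  exact Nat.lt_succ_of_le (List.length_dropWhile_le _ _)

def render_specs_alt (specs : List (List (String × String))) : List String :=
  pvAltLoop specs true

-- ===== PRECONDITION & SPEC =====
-- Pre_ excludes exactly the inputs where Python A raises: the empty list (IndexError on specs[0])
-- and elements missing a 'kind' or 'spec' key (KeyError).
def Pre_render_specs (specs : List (List (String × String))) : Prop :=
  specs ≠ [] ∧ ∀ s ∈ specs,
    (s.find? (fun p => p.1 == "kind")).isSome = true ∧
    (s.find? (fun p => p.1 == "spec")).isSome = true
instance (specs : List (List (String × String))) : Decidable (Pre_render_specs specs) := by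
  unfold Pre_render_specs; infer_instance

def pvWitness_render_specs : (List (List (String × String))) :=
  [[("kind", "a"), ("spec", "s1")], [("kind", "b"), ("spec", "s2")]]

def Spec_render_specs (specs : List (List (String × String))) (out : List String) : Prop := out = render_specs_alt specs
instance (specs : List (List (String × String))) (out : List String) : Decidable (Spec_render_specs specs out) := by unfold Spec_render_specs; infer_instance

-- ===== CLAIM (what is proved, stated in full; the proofs are below) =====
def Claim_equal_render_specs : Prop := ∀ (specs : List (List (String × String))), Dom_render_specs specs → Pre_render_specs specs → Spec_render_specs specs (render_specs specs)

-- ===== LEMMAS AND PROOFS =====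

-- A's loop, written as structural recursion on the remaining list with the running kind
def pvALoop (xs : List (List (String × String))) (k : String) : List String :=
  match xs with
  | [] => []
  | x :: rest =>
    if pvDGet x "kind" ≠ k then
      "\n---\n" :: pvDGet x "spec" :: pvALoop rest (pvDGet x "kind")
    else
      pvDGet x "spec" :: pvALoop rest k

theorem pvFoldl_eq_aLoop (xs : List (List (String × String))) (acc : List String) (k : String) :
    (xs.foldl
      (fun (st : List String × String) s =>
        let kk := pvDGet s "kind"
        if kk ≠ st.2 then (st.1 ++ ["\n---\n", pvDGet s "spec"], kk)
        else (st.1 ++ [pvDGet s "spec"], st.2))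
      (acc, k)).1 = acc ++ pvALoop xs k := by
  induction xs generalizing acc k with
  | nil => simp [pvALoop]
  | cons x rest ih =>
    simp only [List.foldl_cons, pvALoop]
    split_ifs with h
    · rw [ih]; simp
    · rw [ih]; simp

theorem pvAltLoop_cons (x : List (String × String)) (rest : List (List (String × String)))
    (first : Bool) :
    pvAltLoop (x :: rest) first =
      (if first then [] else ["\n---\n"])
        ++ (x :: (rest.span (fun s => pvDGet s "kind" == pvDGet x "kind")).1).map
            (fun s => pvDGet s "spec")
        ++ pvAltLoop (rest.span (fun s => pvDGet s "kind" == pvDGet x "kind")).2 false := by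
  rw [pvAltLoop]

theorem pvALoop_eq_span (xs : List (List (String × String))) (k : String) :
    pvALoop xs k =
      (xs.span (fun s => pvDGet s "kind" == k)).1.map (fun s => pvDGet s "spec")
        ++ pvAltLoop (xs.span (fun s => pvDGet s "kind" == k)).2 false := by
  induction xs generalizing k with
  | nil => simp [pvALoop, pvAltLoop]
  | cons x rest ih =>
    by_cases h : pvDGet x "kind" = k
    · have hb : (fun s => pvDGet s "kind" == k) x = true := by simp [h]
      simp only [List.span_eq_takeWhile_dropWhile] at *
      simp only [List.takeWhile_cons, List.dropWhile_cons, hb]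
      simp only [pvALoop, h]
      simp [ih k]
    · have hb : (fun s => pvDGet s "kind" == k) x = false := by simp [h]
      simp only [List.span_eq_takeWhile_dropWhile] at *
      simp only [List.takeWhile_cons, List.dropWhile_cons, hb]
      simp only [pvALoop, if_pos h]
      simp only [Bool.false_eq_true, if_false, List.map_nil, List.nil_append]
      rw [pvAltLoop_cons]
      simp only [List.span_eq_takeWhile_dropWhile]
      simp [ih (pvDGet x "kind")]

-- ===== VERDICT (by name: the statement is the Claim_ definition above) =====
theorem render_specs_spec : Claim_equal_render_specs := by
  intro specs _ hpre
  unfold Spec_render_specs render_specs render_specs_alt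
  obtain ⟨hne, -⟩ := hpre
  obtain ⟨x, rest, rfl⟩ := List.exists_cons_of_ne_nil hne
  have hget : ((PySem.List.pyGet? (x :: rest) 0).map (fun d => pvDGet d "kind")).getD ""
      = pvDGet x "kind" := by
    simp [PySem.List.pyGet?, PySem.List.pyIdx?]
  rw [hget, pvFoldl_eq_aLoop, List.nil_append, pvALoop_eq_span, pvAltLoop_cons]
  simp [List.span_eq_takeWhile_dropWhile]
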